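-- pv_equiv track=rewrite | github.com/linhdvu14/cp-sols | sols/CodeForces/practice/A_Enlarge_GCD.py | solve
-- ===== SOURCE A (Python) =====
-- from math import gcd
--
-- def sieve(N):
--     lpf = [0] * (N + 1)
--     primes = []
--     for i in range(2, N+1):
--         if lpf[i] == 0:
--             lpf[i] = i
--             primes.append(i)
--         for p in primes:
--             if p * i > N or p > lpf[i]: break
--             lpf[p * i] = p
--     return lpf
--
-- def solve(N, A):
--     g = 0
--     for a in A: g = gcd(g, a)
--
--     cnt = {}
--     for a in A:
--         a //= g
--         cnt[a] = cnt.get(a, 0) + 1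
--
--     # find factors that appear in most numbers
--     lpf = sieve(max(A))
--     fac_cnt = {}
--     for a, c in cnt.items():
--         while a > 1:
--             p = lpf[a]
--             fac_cnt[p] = fac_cnt.get(p, 0) + c
--             while a % p == 0: a //= p
--
--     if not fac_cnt: return -1
--     return N - max(fac_cnt.values())
-- ===== SOURCE B (Python) =====
-- from math import gcd
--
-- def solve(N, A):
--     g = 0
--     for a in A:
--         g = gcd(g, a)
--
--     cnt = {}
--     for a in A:
--         a //= g
--         cnt[a] = cnt.get(a, 0) + 1
--
--     # trial-division factorization of each distinct reduced value (no sieve)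
--     fac_cnt = {}
--     for a, c in cnt.items():
--         d = 2
--         while d * d <= a:
--             if a % d == 0:
--                 fac_cnt[d] = fac_cnt.get(d, 0) + c
--                 while a % d == 0:
--                     a //= d
--             d += 1
--         if a > 1:
--             fac_cnt[a] = fac_cnt.get(a, 0) + c
--
--     if not fac_cnt:
--         return -1
--     return N - max(fac_cnt.values())
-- ===== Notes on version B (the rewrite author's own statement) =====
-- stated objective: simpler
-- what changed: B factorizes each distinct reduced value by direct trial division (stripping each found divisor), replacing A's linear least-prime-factor sieve built up to max(A); the sieve, the primes list and the max(A) pass disappear.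
import Mathlib
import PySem

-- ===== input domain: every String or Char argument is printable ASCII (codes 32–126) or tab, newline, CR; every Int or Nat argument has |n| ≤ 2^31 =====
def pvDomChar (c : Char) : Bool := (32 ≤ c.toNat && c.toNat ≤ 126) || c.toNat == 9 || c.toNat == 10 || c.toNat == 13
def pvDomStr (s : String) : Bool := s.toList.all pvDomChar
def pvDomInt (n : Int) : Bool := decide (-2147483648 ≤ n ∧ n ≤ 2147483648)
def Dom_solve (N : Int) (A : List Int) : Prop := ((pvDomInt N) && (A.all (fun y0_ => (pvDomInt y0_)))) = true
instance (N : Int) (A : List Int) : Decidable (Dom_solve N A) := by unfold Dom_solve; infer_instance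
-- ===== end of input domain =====

-- B replaces A's least-prime-factor sieve by per-value trial division (simpler: no sieve, no primes list, no max(A) pass).

-- ===== PORT A =====
-- math.gcd(g, a): nonnegative gcd of absolute values
def pyGcd (g a : Int) : Int := (Int.gcd g a : Int)

-- Python's list used as a mutable array: Array Int; reads/writes are exact for the
-- nonnegative in-range indices these loops use (2 ≤ i ≤ N, writes at p*i ≤ N)
def pyAGet (arr : Array Int) (i : Int) : Int := arr.getD i.toNat 0
def pyASet (arr : Array Int) (i v : Int) : Array Int := arr.setIfInBounds i.toNat v

-- `for p in primes: if p * i > N or p > lpf[i]: break; lpf[p*i] = p`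
-- `[0] * (N + 1)` is Array.replicate; the `while` loops carry a fuel argument that only makes
-- them total (a.toNat steps always suffice on actual calls); otherwise step-for-step A.
def stripA (p : Int) : Nat → Int → Int
  | 0, a => a
  | fuel + 1, a => if PySem.Int.mod a p == 0 then stripA p fuel (PySem.Int.floordiv a p) else a

def facLoopA (lpf : Array Int) : Nat → Int → Int → PySem.Dict Int Int → PySem.Dict Int Int
  | 0, _, _, fac => fac
  | fuel + 1, a, c, fac =>
      if a > 1 then
        let p := pyAGet lpf a
        facLoopA lpf fuel (stripA p a.toNat a) c (fac.insert p (fac.getD p 0 + c))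
      else fac

def sieveInner (i N : Int) : List Int → Array Int → Array Int
  | [], lpf => lpf
  | p :: ps, lpf =>
      if p * i > N || p > pyAGet lpf i then lpf
      else sieveInner i N ps (pyASet lpf (p * i) p)

def sieveStep (N : Int) (st : Array Int × List Int) (i : Int) : Array Int × List Int :=
  let br := if pyAGet st.1 i == 0
            then (pyASet st.1 i i, st.2 ++ [i]) else (st.1, st.2)
  (sieveInner i N br.2 br.1, br.2)

def sieve (N : Int) : Array Int :=
  ((PySem.List.pyRange 2 (N + 1) 1).foldl (sieveStep N) (Array.replicate (N + 1).toNat 0, [])).1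

-- condition under which index m is already written, mid-iteration i, with primes qs still to process

def solve (N : Int) (A : List Int) : Int :=
  let g := A.foldl (fun g a => pyGcd g a) 0
  let cnt := A.foldl (fun (cnt : PySem.Dict Int Int) a =>
      cnt.insert (PySem.Int.floordiv a g) (cnt.getD (PySem.Int.floordiv a g) 0 + 1)) PySem.Dict.empty
  let mx := (PySem.List.max? A (fun x => x)).getD 0   -- max(A); none = ValueError, excluded by Pre_solve
  let lpf := sieve mx
  let fac := cnt.items.foldl (fun fac ac => facLoopA lpf (ac.1.toNat + 1) ac.1 ac.2 fac) PySem.Dict.empty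
  if fac.items.isEmpty then -1
  else N - (PySem.List.max? fac.values (fun x => x)).getD 0

-- ===== PORT B =====
-- B's `while` loops carry the same kind of fuel argument; otherwise step-for-step Source B.
def stripB (d : Int) : Nat → Int → Int
  | 0, a => a
  | fuel + 1, a => if PySem.Int.mod a d == 0 then stripB d fuel (PySem.Int.floordiv a d) else a

def trialLoop : Nat → Int → Int → Int → PySem.Dict Int Int → PySem.Dict Int Int
  | 0, _, _, _, fac => fac
  | fuel + 1, a, d, c, fac =>
      if d * d ≤ a then
        if PySem.Int.mod a d == 0 then
          trialLoop fuel (stripB d a.toNat a) (d + 1) c (fac.insert d (fac.getD d 0 + c))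
        else trialLoop fuel a (d + 1) c fac
      else if a > 1 then fac.insert a (fac.getD a 0 + c) else fac

def solve_alt (N : Int) (A : List Int) : Int :=
  let g := A.foldl (fun g a => pyGcd g a) 0
  let cnt := A.foldl (fun (cnt : PySem.Dict Int Int) a =>
      cnt.insert (PySem.Int.floordiv a g) (cnt.getD (PySem.Int.floordiv a g) 0 + 1)) PySem.Dict.empty
  let fac := cnt.items.foldl (fun fac ac => trialLoop (ac.1.toNat + 2) ac.1 2 ac.2 fac) PySem.Dict.empty
  if fac.items.isEmpty then -1
  else N - (PySem.List.max? fac.values (fun x => x)).getD 0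

-- ===== PRECONDITION & SPEC =====
-- Pre_ excludes empty A (A raises ValueError at max(A)) and all-zero A (both raise ZeroDivisionError at `a //= g`).
def Pre_solve (N : Int) (A : List Int) : Prop := A ≠ [] ∧ ∃ x ∈ A, x ≠ 0
instance (N : Int) (A : List Int) : Decidable (Pre_solve N A) := by unfold Pre_solve; infer_instance
def pvWitness_solve : Int × List Int := (3, [2, 4, 6])

def Spec_solve (N : Int) (A : List Int) (out : Int) : Prop := out = solve_alt N A
instance (N : Int) (A : List Int) (out : Int) : Decidable (Spec_solve N A out) := by unfold Spec_solve; infer_instance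

-- ===== CLAIM (what is proved, stated in full; the proofs are below) =====
def Claim_equal_solve : Prop := ∀ (N : Int) (A : List Int), Dom_solve N A → Pre_solve N A → Spec_solve N A (solve N A)

-- ===== LEMMAS AND PROOFS =====

lemma pyAGet_toList (arr : Array Int) (n : Nat) : pyAGet arr (n : Int) = arr.toList.getD n 0 := by
  rw [pyAGet, Int.toNat_natCast, List.getD_eq_getElem?_getD, Array.getElem?_toList]
  unfold Array.getD
  split_ifs with h
  · rw [Array.getElem?_eq_getElem h]; rfl
  · rw [Array.getElem?_eq_none (by omega)]; rfl

lemma pyASet_toList (arr : Array Int) (n : Nat) (v : Int) :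
    (pyASet arr (n : Int) v).toList = arr.toList.set n v := by
  rw [pyASet, Int.toNat_natCast, Array.toList_setIfInBounds]

def stripN (p a : Nat) : Nat :=
  if h : 2 ≤ p ∧ p ∣ a ∧ a ≠ 0 then stripN p (a / p) else a
  termination_by a
  decreasing_by exact Nat.div_lt_self (Nat.pos_of_ne_zero h.2.2) (by omega)

lemma strip_le (p a : Nat) : stripN p a ≤ a := by
  induction a using Nat.strong_induction_on with
  | _ a ih =>
    rw [stripN]
    split_ifs with h
    · have hlt : a / p < a := Nat.div_lt_self (Nat.pos_of_ne_zero h.2.2) (by omega)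
      exact le_trans (ih _ hlt) (le_of_lt hlt)
    · exact le_rfl

lemma strip_pos (p a : Nat) (h : a ≠ 0) : stripN p a ≠ 0 := by
  induction a using Nat.strong_induction_on with
  | _ a ih =>
    rw [stripN]
    split_ifs with hc
    · have hlt : a / p < a := Nat.div_lt_self (Nat.pos_of_ne_zero hc.2.2) (by omega)
      have : a / p ≠ 0 := by
        have := Nat.le_of_dvd (Nat.pos_of_ne_zero hc.2.2) hc.2.1
        have := Nat.div_pos this (by omega)
        omega
      exact ih _ hlt this
    · exact h

lemma strip_dvd (p a : Nat) : stripN p a ∣ a := by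
  induction a using Nat.strong_induction_on with
  | _ a ih =>
    rw [stripN]
    split_ifs with h
    · have hlt : a / p < a := Nat.div_lt_self (Nat.pos_of_ne_zero h.2.2) (by omega)
      exact dvd_trans (ih _ hlt) (Nat.div_dvd_of_dvd h.2.1)
    · exact dvd_rfl

lemma strip_not_dvd (p a : Nat) (hp : 2 ≤ p) (ha : a ≠ 0) : ¬ p ∣ stripN p a := by
  induction a using Nat.strong_induction_on with
  | _ a ih =>
    rw [stripN]
    split_ifs with h
    · have hlt : a / p < a := Nat.div_lt_self (Nat.pos_of_ne_zero h.2.2) (by omega)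
      have : a / p ≠ 0 := by
        have := Nat.le_of_dvd (Nat.pos_of_ne_zero h.2.2) h.2.1
        have := Nat.div_pos this (by omega)
        omega
      exact ih _ hlt this
    · intro hd
      exact h ⟨hp, hd, ha⟩

lemma strip_lt (p a : Nat) (hp : 2 ≤ p) (hd : p ∣ a) (ha : a ≠ 0) : stripN p a < a := by
  rw [stripN]
  split_ifs with h
  · have hlt : a / p < a := Nat.div_lt_self (Nat.pos_of_ne_zero h.2.2) (by omega)
    exact lt_of_le_of_lt (strip_le p _) hlt
  · exact absurd ⟨hp, hd, ha⟩ h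

-- primes ≠ p preserved by strip

lemma minFac_two_le (m : Nat) (h : 2 ≤ m) : 2 ≤ m.minFac :=
  (Nat.minFac_prime (by omega)).two_le

def spfList (a : Nat) : List Nat :=
  if h : 2 ≤ a then a.minFac :: spfList (stripN a.minFac a) else []
  termination_by a
  decreasing_by
    exact strip_lt _ _ (minFac_two_le a h) (Nat.minFac_dvd a) (by omega)

lemma spfList_of_lt (a : Nat) (h : a < 2) : spfList a = [] := by
  rw [spfList]; simp [Nat.not_le.mpr h]

lemma spfList_of_ge (a : Nat) (h : 2 ≤ a) : spfList a = a.minFac :: spfList (stripN a.minFac a) := by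
  rw [spfList]; simp [h]

-- spfList of a prime is [a]

lemma spfList_prime (a : Nat) (h : a.Prime) : spfList a = [a] := by
  rw [spfList_of_ge a h.two_le, Nat.Prime.minFac_eq h]
  have h1 : stripN a a = stripN a 1 := by
    rw [stripN, dif_pos ⟨h.two_le, dvd_refl a, by have := h.two_le; omega⟩,
        Nat.div_self (by have := h.two_le; omega)]
  have h2 : stripN a 1 = 1 := by
    rw [stripN]
    have : ¬ a ∣ 1 := Nat.Prime.one_lt h |> fun hh => by
      intro hd; have := Nat.le_of_dvd (by omega) hd; omega
    simp [this]
  rw [h1, h2, spfList_of_lt 1 (by omega)]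

-- trial division: if a has no divisor in [2,d) and d² > a then a is prime (for a ≥ 2)

lemma prime_of_no_small_divisor (a d : Nat) (ha : 2 ≤ a) (hd : a < d * d)
    (hno : ∀ q, 2 ≤ q → q < d → ¬ q ∣ a) : a.Prime := by
  by_contra hnp
  have h1 := Nat.minFac_sq_le_self (by omega) hnp
  have h2 : a.minFac ∣ a := Nat.minFac_dvd a
  have h3 : 2 ≤ a.minFac := minFac_two_le a ha
  have h4 : a.minFac < d := by nlinarith [h1]
  exact hno _ h3 h4 h2

lemma minFac_eq_of_no_small (a d : Nat) (hd2 : 2 ≤ d) (hdvd : d ∣ a) (ha : 2 ≤ a)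
    (hno : ∀ q, 2 ≤ q → q < d → ¬ q ∣ a) : a.minFac = d := by
  have h1 : a.minFac ≤ d := Nat.minFac_le_of_dvd hd2 hdvd
  have h3 : 2 ≤ a.minFac := minFac_two_le a ha
  by_contra hne
  exact hno _ h3 (by omega) (Nat.minFac_dvd a)

def sec (m : Nat) : Nat := if m.Prime then m else m / m.minFac

lemma sec_prime (m : Nat) (h : m.Prime) : sec m = m := by simp [sec, h]

lemma sec_comp (m : Nat) (h : ¬ m.Prime) : sec m = m / m.minFac := by simp [sec, h]

lemma comp_facts (m : Nat) (hm : 2 ≤ m) (h : ¬ m.Prime) :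
    2 ≤ sec m ∧ sec m < m ∧ m.minFac * sec m = m ∧ m.minFac ≤ (sec m).minFac := by
  have hd : m.minFac ∣ m := Nat.minFac_dvd m
  have h2 : 2 ≤ m.minFac := minFac_two_le m hm
  have hmul : m.minFac * (m / m.minFac) = m := Nat.mul_div_cancel' hd
  have hlt : m / m.minFac < m := Nat.div_lt_self (by omega) (by omega)
  have hne1 : m / m.minFac ≠ 1 := by
    intro h1
    rw [h1, Nat.mul_one] at hmul
    exact h (hmul ▸ Nat.minFac_prime (by omega))
  have hpos : 0 < m / m.minFac := Nat.div_pos (Nat.minFac_le (by omega)) (by omega)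
  have hsec2 : 2 ≤ sec m := by rw [sec_comp m h]; omega
  refine ⟨hsec2, by rw [sec_comp m h]; exact hlt, by rw [sec_comp m h]; exact hmul, ?_⟩
  rw [sec_comp m h]
  have hdvd2 : (m / m.minFac).minFac ∣ m := dvd_trans (Nat.minFac_dvd _) (Nat.div_dvd_of_dvd hd)
  exact Nat.minFac_le_of_dvd (minFac_two_le _ (by rw [sec_comp m h] at hsec2; omega)) hdvd2

lemma prod_facts (q i : Nat) (hq : q.Prime) (hi : 2 ≤ i) (hle : q ≤ i.minFac) :
    (q * i).minFac = q ∧ ¬ (q * i).Prime ∧ sec (q * i) = i := by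
  have hq2 := hq.two_le
  have hmge : 2 ≤ q * i := by nlinarith
  have hminle : (q * i).minFac ≤ q := Nat.minFac_le_of_dvd hq2 (Dvd.intro i rfl)
  have hminge : q ≤ (q * i).minFac := by
    have hp := Nat.minFac_prime (by omega : q * i ≠ 1)
    have hd := Nat.minFac_dvd (q * i)
    rcases (Nat.Prime.dvd_mul hp).1 hd with h1 | h1
    · have := (Nat.prime_dvd_prime_iff_eq hp hq).1 h1
      omega
    · have h2 : i.minFac ≤ (q * i).minFac := Nat.minFac_le_of_dvd hp.two_le h1
      omega
  have hmin : (q * i).minFac = q := by omega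
  have hnp : ¬ (q * i).Prime := by
    intro hp
    rcases (Nat.Prime.eq_one_or_self_of_dvd hp q (Dvd.intro i rfl)) with h | h <;> nlinarith
  refine ⟨hmin, hnp, ?_⟩
  rw [sec_comp _ hnp, hmin, Nat.mul_div_cancel_left _ (by omega)]

def applyFacs (ps : List Nat) (c : Int) (fac : PySem.Dict Int Int) : PySem.Dict Int Int :=
  ps.foldl (fun fac p => fac.insert (p : Int) (fac.getD (p : Int) 0 + c)) fac

lemma stripA_eq (p m : Nat) (hp : 2 ≤ p) (hm : 1 ≤ m) :
    ∀ fuel : Nat, m ≤ fuel → stripA (p : Int) fuel (m : Int) = (stripN p m : Int) := by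
  induction m using Nat.strong_induction_on with
  | _ m ih =>
    intro fuel hf
    match fuel with
    | 0 => omega
    | fuel + 1 =>
      rw [stripA]
      rw [PySem.Int.mod_natCast]
      by_cases hd : p ∣ m
      · have hmod : m % p = 0 := Nat.eq_zero_of_dvd_of_lt hd |> fun _ => (Nat.mod_eq_zero_of_dvd hd)
        have hlt : m / p < m := Nat.div_lt_self (by omega) (by omega)
        have hpos : 1 ≤ m / p := Nat.div_pos (Nat.le_of_dvd (by omega) hd) (by omega)
        rw [hmod]
        simp only [Nat.cast_zero, beq_self_eq_true, if_true]
        rw [PySem.Int.floordiv_natCast]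
        have hs : stripN p m = stripN p (m / p) := by
          conv_lhs => rw [stripN]
          rw [dif_pos ⟨hp, hd, by omega⟩]
        rw [ih _ hlt hpos fuel (by omega), hs]
      · have hmod : m % p ≠ 0 := fun h => hd (Nat.dvd_of_mod_eq_zero h)
        have : ((m % p : Nat) : Int) ≠ 0 := by exact_mod_cast hmod
        rw [if_neg (by simpa using this)]
        rw [stripN, dif_neg (by tauto)]

lemma applyFacs_nil (c : Int) (fac : PySem.Dict Int Int) : applyFacs [] c fac = fac := rfl

lemma applyFacs_cons (p : Nat) (ps : List Nat) (c : Int) (fac : PySem.Dict Int Int) :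
    applyFacs (p :: ps) c fac = applyFacs ps c (fac.insert (p : Int) (fac.getD (p : Int) 0 + c)) := rfl

lemma facLoopA_eq (lpf : Array Int) (X : Int)
    (H : ∀ m : Nat, 2 ≤ m → (m : Int) ≤ X → pyAGet lpf (m : Int) = (m.minFac : Int)) :
    ∀ (n : Nat), (2 ≤ n → (n : Int) ≤ X) → ∀ (fuel : Nat), n ≤ fuel → ∀ (c : Int) fac,
      facLoopA lpf fuel (n : Int) c fac = applyFacs (spfList n) c fac := by
  intro n
  induction n using Nat.strong_induction_on with
  | _ n ih =>
    intro hX fuel hf c fac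
    by_cases hn : 2 ≤ n
    · match fuel with
      | 0 => omega
      | fuel + 1 =>
        rw [facLoopA]
        rw [if_pos (by exact_mod_cast (by omega : (1:Int) < (n:Int)))]
        have hp := H n hn (hX hn)
        rw [hp]
        have h2 : 2 ≤ n.minFac := minFac_two_le n hn
        have htn : ((n : Int)).toNat = n := Int.toNat_natCast n
        rw [htn]
        change facLoopA lpf fuel (stripA ((n.minFac : Int)) n (n : Int)) c
            (fac.insert (n.minFac : Int) (fac.getD (n.minFac : Int) 0 + c)) = _
        rw [stripA_eq n.minFac n h2 (by omega) n (le_refl n)]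
        set n' := stripN n.minFac n with hn'
        have hlt : n' < n := strip_lt _ _ h2 (Nat.minFac_dvd n) (by omega)
        have h1' : 1 ≤ n' := by
          have := strip_pos n.minFac n (by omega); omega
        rw [ih n' hlt (fun _ => le_trans (by exact_mod_cast hlt.le) (hX hn)) fuel (by omega)]
        rw [spfList_of_ge n hn, applyFacs_cons]
    · have h0 : spfList n = [] := spfList_of_lt n (by omega)
      rw [h0, applyFacs_nil]
      match fuel with
      | 0 => rw [facLoopA]
      | fuel + 1 =>
        rw [facLoopA, if_neg (by exact_mod_cast (by omega : ¬ (1:Int) < (n:Int)))]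

lemma stripB_eq_stripA (d : Int) : ∀ (fuel : Nat) (a : Int), stripB d fuel a = stripA d fuel a := by
  intro fuel
  induction fuel with
  | zero => intro a; rfl
  | succ f ih => intro a; rw [stripB, stripA]; split_ifs <;> simp [ih]

lemma trialLoop_eq : ∀ (fuel : Nat) (n d : Nat), 2 ≤ d →
    (∀ q, 2 ≤ q → q < d → ¬ q ∣ n) → ((n : Int) - (d : Int)).toNat + 1 ≤ fuel →
    ∀ (c : Int) (fac : PySem.Dict Int Int),
      trialLoop fuel (n : Int) (d : Int) c fac = applyFacs (spfList n) c fac := by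
  intro fuel
  induction fuel with
  | zero => intro n d _ _ hf; omega
  | succ fuel ih =>
    intro n d hd2 hinv hf c fac
    rw [trialLoop]
    by_cases hsq : (d : Int) * (d : Int) ≤ (n : Int)
    · rw [if_pos hsq]
      have hsqn : d * d ≤ n := by exact_mod_cast hsq
      have hn2 : 2 ≤ n := by nlinarith
      have hdn : d + 2 ≤ n := by nlinarith
      rw [PySem.Int.mod_natCast]
      by_cases hdvd : d ∣ n
      · have hmod : n % d = 0 := Nat.mod_eq_zero_of_dvd hdvd
        rw [hmod, if_pos (by simp)]
        have hmf : n.minFac = d := minFac_eq_of_no_small n d hd2 hdvd hn2 hinv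
        rw [stripB_eq_stripA, Int.toNat_natCast,
            stripA_eq d n hd2 (by omega) n (le_refl n)]
        set n' := stripN d n with hn'
        have hlt : n' < n := strip_lt _ _ hd2 hdvd (by omega)
        have hpos : n' ≠ 0 := strip_pos _ _ (by omega)
        have hstep : ((d : Int) + 1) = ((d + 1 : Nat) : Int) := by push_cast; ring
        rw [hstep]
        have hinv' : ∀ q, 2 ≤ q → q < d + 1 → ¬ q ∣ n' := by
          intro q hq2 hqd hqdvd
          by_cases hq : q = d
          · subst hq; exact strip_not_dvd _ n hd2 (by omega) hqdvd
          · exact hinv q hq2 (by omega) (dvd_trans hqdvd (strip_dvd d n))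
        rw [ih n' (d + 1) (by omega) hinv' (by omega) c _]
        rw [spfList_of_ge n hn2, hmf, applyFacs_cons]
      · have hmod : n % d ≠ 0 := fun h => hdvd (Nat.dvd_of_mod_eq_zero h)
        rw [if_neg (by simpa using (by exact_mod_cast hmod : ((n % d : Nat) : Int) ≠ 0))]
        have hstep : ((d : Int) + 1) = ((d + 1 : Nat) : Int) := by push_cast; ring
        rw [hstep]
        have hinv' : ∀ q, 2 ≤ q → q < d + 1 → ¬ q ∣ n := by
          intro q hq2 hqd hqdvd
          by_cases hq : q = d
          · subst hq; exact hdvd hqdvd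
          · exact hinv q hq2 (by omega) hqdvd
        exact ih n (d + 1) (by omega) hinv' (by omega) c fac
    · rw [if_neg hsq]
      by_cases hn2 : 2 ≤ n
      · rw [if_pos (by exact_mod_cast (by omega : (1:Int) < (n:Int)))]
        have hlt2 : n < d * d := by exact_mod_cast (not_le.mp hsq)
        have hp : n.Prime := prime_of_no_small_divisor n d hn2 hlt2 hinv
        rw [spfList_prime n hp, applyFacs_cons, applyFacs_nil]
      · rw [if_neg (by exact_mod_cast (by omega : ¬ (1:Int) < (n:Int)))]
        rw [spfList_of_lt n (by omega), applyFacs_nil]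

def Cq (i : Nat) (qs : List Int) (m : Nat) : Prop :=
  sec m < i ∨ (m = i ∧ i.Prime) ∨ (¬ m.Prime ∧ sec m = i ∧ (m.minFac : Int) ∉ qs)

lemma sec_le_self (m : Nat) (h : 2 ≤ m) : sec m ≤ m := by
  by_cases hp : m.Prime
  · rw [sec_prime m hp]
  · exact le_of_lt (comp_facts m h hp).2.1

lemma sec_ge_two (m : Nat) (h : 2 ≤ m) : 2 ≤ sec m := by
  by_cases hp : m.Prime
  · rw [sec_prime m hp]; omega
  · exact (comp_facts m h hp).1

lemma minFac_lt_of_comp (m : Nat) (hm : 2 ≤ m) (h : ¬ m.Prime) : m.minFac < m := by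
  obtain ⟨h1, h2, h3, _⟩ := comp_facts m hm h
  nlinarith [minFac_two_le m hm]

-- pending index facts: composite m with sec m = i

lemma pending_facts (i m : Nat) (hm : 2 ≤ m) (hmp : ¬ m.Prime) (hsec : sec m = i) :
    m.minFac * i = m ∧ m.minFac ≤ i.minFac := by
  obtain ⟨h1, h2, h3, h4⟩ := comp_facts m hm hmp
  exact ⟨by rw [← hsec]; exact h3, by rw [← hsec]; exact h4⟩

lemma inner_go (Nx : Int) (i : Nat) (hi : 2 ≤ i) (hiN : (i : Int) ≤ Nx) :
    ∀ (qs : List Int) (lpf : Array Int),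
    lpf.toList.length = (Nx + 1).toNat →
    (∀ q ∈ qs, ∃ qn : Nat, q = (qn : Int) ∧ qn.Prime ∧ qn ≤ i) →
    qs.Pairwise (· < ·) →
    (∀ m : Nat, 2 ≤ m → m < (Nx + 1).toNat → Cq i qs m → lpf.toList.getD m 0 = (m.minFac : Int)) →
    (∀ m : Nat, 2 ≤ m → m < (Nx + 1).toNat → ¬ Cq i qs m → lpf.toList.getD m 0 = 0) →
    (sieveInner (i : Int) Nx qs lpf).toList.length = (Nx + 1).toNat ∧
    (∀ m : Nat, 2 ≤ m → m < (Nx + 1).toNat →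
      (sec m ≤ i → (sieveInner (i : Int) Nx qs lpf).toList.getD m 0 = (m.minFac : Int)) ∧
      (¬ sec m ≤ i → (sieveInner (i : Int) Nx qs lpf).toList.getD m 0 = 0)) := by
  intro qs
  induction qs with
  | nil =>
    intro lpf hlen _ _ hset hunset
    rw [sieveInner]
    refine ⟨hlen, fun m hm2 hmN => ⟨fun hle => ?_, fun hgt => ?_⟩⟩
    · apply hset m hm2 hmN
      rcases lt_or_eq_of_le hle with h | h
      · exact Or.inl h
      · by_cases hp : m.Prime
        · have hmi : m = i := by rw [sec_prime m hp] at h; exact h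
          exact Or.inr (Or.inl ⟨hmi, hmi ▸ hp⟩)
        · exact Or.inr (Or.inr ⟨hp, h, List.not_mem_nil⟩)
    · apply hunset m hm2 hmN
      intro hC
      rcases hC with h | ⟨h, hip⟩ | ⟨hmp, h, _⟩
      · omega
      · subst h; rw [sec_prime m hip] at hgt; omega
      · omega
  | cons p qs' ih =>
    intro lpf hlen hqs hsort hset hunset
    obtain ⟨pn, hpcast, hpprime, hpi⟩ := hqs p (List.mem_cons_self)
    have hiNN : i < (Nx + 1).toNat := by omega
    have hCi : Cq i (p :: qs') i := by
      by_cases hp : i.Prime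
      · exact Or.inr (Or.inl ⟨rfl, hp⟩)
      · exact Or.inl (comp_facts i hi hp).2.1
    have hlpfi : lpf.toList.getD i 0 = (i.minFac : Int) := hset i hi hiNN hCi
    rw [sieveInner]
    rw [pyAGet_toList lpf i, hlpfi]
    by_cases hbr : p * (i : Int) > Nx ∨ p > (i.minFac : Int)
    · rw [if_pos (by simpa using hbr)]
      -- break: every still-pending write is impossible
      refine ⟨hlen, fun m hm2 hmN => ⟨fun hle => ?_, fun hgt => ?_⟩⟩
      · apply hset m hm2 hmN
        rcases lt_or_eq_of_le hle with h | h
        · exact Or.inl h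
        · by_cases hp : m.Prime
          · have hmi : m = i := by rw [sec_prime m hp] at h; exact h
            exact Or.inr (Or.inl ⟨hmi, hmi ▸ hp⟩)
          · refine Or.inr (Or.inr ⟨hp, h, fun hmem => ?_⟩)
            obtain ⟨hprod, hmle⟩ := pending_facts i m hm2 hp h
            have hplb : p ≤ (m.minFac : Int) := by
              rcases List.mem_cons.mp hmem with he | ht
              · omega
              · have := (List.pairwise_cons.mp hsort).1 _ ht; omega
            rcases hbr with hb | hb
            · have hmNx : (m : Int) ≤ Nx := by omega
              have : (m.minFac : Int) * (i : Int) = (m : Int) := by exact_mod_cast hprod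
              nlinarith [hplb, hb]
            · have : (m.minFac : Int) ≤ (i.minFac : Int) := by exact_mod_cast hmle
              omega
      · apply hunset m hm2 hmN
        intro hC
        rcases hC with h | ⟨h, hip⟩ | ⟨hmp, h, _⟩
        · omega
        · subst h; rw [sec_prime m hip] at hgt; omega
        · omega
    · rw [if_neg (by simpa using hbr)]
      rw [not_or] at hbr; rw [not_lt, not_lt] at hbr
      obtain ⟨hb1, hb2⟩ := hbr
      have hpn2 : 2 ≤ pn := hpprime.two_le
      have hpnle : pn ≤ i.minFac := by rw [hpcast] at hb2; exact_mod_cast hb2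
      obtain ⟨hmf, hnp, hsec⟩ := prod_facts pn i hpprime hi hpnle
      have hwcast : p * (i : Int) = ((pn * i : Nat) : Int) := by rw [hpcast]; push_cast; ring
      have hwN : ((pn * i : Nat) : Int) ≤ Nx := by rw [← hwcast]; exact hb1
      have hwNN : pn * i < (Nx + 1).toNat := by omega
      have hw2 : 2 ≤ pn * i := by nlinarith
      rw [hwcast]
      have hpnotin : p ∉ qs' := fun hmem => by
        have := (List.pairwise_cons.mp hsort).1 _ hmem; omega
      -- apply ih to the updated list
      apply ih (pyASet lpf ((pn * i : Nat) : Int) p) (by rw [pyASet_toList]; simpa using hlen)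
        (fun q hq => hqs q (List.mem_cons_of_mem _ hq)) (List.pairwise_cons.mp hsort).2
      · -- set entries
        intro m hm2 hmN hC
        rw [pyASet_toList]
        by_cases hme : m = pn * i
        · subst hme
          rw [List.getD_eq_getElem?_getD, List.getElem?_set_self (by omega), Option.getD_some, hmf, hpcast]
        · rw [List.getD_eq_getElem?_getD, List.getElem?_set_ne (fun h => hme h.symm), ← List.getD_eq_getElem?_getD]
          apply hset m hm2 hmN
          rcases hC with h | h | ⟨hmp, h, hnin⟩
          · exact Or.inl h
          · exact Or.inr (Or.inl h)
          · refine Or.inr (Or.inr ⟨hmp, h, fun hmem => ?_⟩)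
            rcases List.mem_cons.mp hmem with he | ht
            · -- m.minFac = pn forces m = pn * i
              apply hme
              obtain ⟨hprod, _⟩ := pending_facts i m hm2 hmp h
              have : m.minFac = pn := by rw [hpcast] at he; exact_mod_cast he
              rw [← hprod, this]
            · exact hnin ht
      · -- unset entries
        intro m hm2 hmN hC
        have hme : m ≠ pn * i := by
          intro hme; subst hme
          exact hC (Or.inr (Or.inr ⟨hnp, hsec, by rw [hmf, ← hpcast]; exact hpnotin⟩))
        rw [pyASet_toList, List.getD_eq_getElem?_getD, List.getElem?_set_ne (fun h => hme h.symm), ← List.getD_eq_getElem?_getD]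
        apply hunset m hm2 hmN
        intro hC'
        apply hC
        rcases hC' with h | h | ⟨hmp, h, hnin⟩
        · exact Or.inl h
        · exact Or.inr (Or.inl h)
        · exact Or.inr (Or.inr ⟨hmp, h, fun hmem => hnin (List.mem_cons_of_mem _ hmem)⟩)

def SInv (Nx : Int) (i : Nat) (st : Array Int × List Int) : Prop :=
  st.1.toList.length = (Nx + 1).toNat ∧
  (∀ q ∈ st.2, ∃ qn : Nat, q = (qn : Int) ∧ qn.Prime ∧ qn < i) ∧
  (∀ qn : Nat, qn.Prime → qn < i → (qn : Int) ∈ st.2) ∧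
  st.2.Pairwise (· < ·) ∧
  (∀ m : Nat, 2 ≤ m → m < (Nx + 1).toNat → sec m < i → st.1.toList.getD m 0 = (m.minFac : Int)) ∧
  (∀ m : Nat, 2 ≤ m → m < (Nx + 1).toNat → ¬ sec m < i → st.1.toList.getD m 0 = 0)

lemma sieveStep_inv (Nx : Int) (i : Nat) (st : Array Int × List Int)
    (hi : 2 ≤ i) (hiN : (i : Int) ≤ Nx) (hinv : SInv Nx i st) :
    SInv Nx (i + 1) (sieveStep Nx st (i : Int)) := by
  obtain ⟨hlen, helems, hcompl, hsort, hset, hunset⟩ := hinv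
  have hiNN : i < (Nx + 1).toNat := by omega
  rw [sieveStep]
  rw [pyAGet_toList st.1 i]
  by_cases hp : i.Prime
  · -- prime i: entry is 0, set lpf[i] = i, append i to primes
    have h0 : st.1.toList.getD i 0 = 0 := hunset i hi hiNN (by rw [sec_prime i hp]; omega)
    rw [h0]
    simp only [BEq.rfl, if_true]
    set lpfm := pyASet st.1 (i : Int) (i : Int) with hlpfm
    set qsm := st.2 ++ [(i : Int)] with hqsm
    have hminfi : i.minFac = i := Nat.Prime.minFac_eq hp
    have hqselems : ∀ q ∈ qsm, ∃ qn : Nat, q = (qn : Int) ∧ qn.Prime ∧ qn ≤ i := by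
      intro q hq
      rcases List.mem_append.mp hq with h | h
      · obtain ⟨qn, h1, h2, h3⟩ := helems q h; exact ⟨qn, h1, h2, by omega⟩
      · rw [List.mem_singleton.mp h]; exact ⟨i, rfl, hp, le_refl i⟩
    have hqssort : qsm.Pairwise (· < ·) := by
      rw [hqsm, List.pairwise_append]
      refine ⟨hsort, List.pairwise_singleton _ _, ?_⟩
      intro q hq _ h'
      rw [List.mem_singleton.mp h']
      obtain ⟨qn, h1, h2, h3⟩ := helems q hq
      rw [h1]; exact_mod_cast h3
    -- third pending disjunct is impossible: minFac m ≤ minFac i = i is always in qsm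
    have hthird : ∀ m : Nat, 2 ≤ m → m < (Nx + 1).toNat → ¬ m.Prime → sec m = i →
        (m.minFac : Int) ∈ qsm := by
      intro m hm2 hmN hmp hsec
      obtain ⟨hprod, hmle⟩ := pending_facts i m hm2 hmp hsec
      rw [hminfi] at hmle
      have hmfp : m.minFac.Prime := Nat.minFac_prime (by omega)
      rcases lt_or_eq_of_le hmle with h | h
      · exact List.mem_append.mpr (Or.inl (hcompl _ hmfp h))
      · exact List.mem_append.mpr (Or.inr (by rw [h]; exact List.mem_singleton_self _))
    have hgo := inner_go Nx i hi hiN qsm lpfm (by rw [hlpfm, pyASet_toList]; simpa using hlen) hqselems hqssort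
      (by
        intro m hm2 hmN hC
        rw [hlpfm, pyASet_toList]
        by_cases hme : m = i
        · subst hme
          rw [List.getD_eq_getElem?_getD, List.getElem?_set_self (by omega), Option.getD_some, hminfi]
        · rw [List.getD_eq_getElem?_getD, List.getElem?_set_ne (fun h => hme h.symm), ← List.getD_eq_getElem?_getD]
          apply hset m hm2 hmN
          rcases hC with h | ⟨h, _⟩ | ⟨hmp, h, hnin⟩
          · exact h
          · exact absurd h hme
          · exact absurd (hthird m hm2 hmN hmp h) hnin)
      (by
        intro m hm2 hmN hC
        have hme : m ≠ i := fun hme => hC (Or.inr (Or.inl ⟨hme, hp⟩))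
        rw [hlpfm, pyASet_toList, List.getD_eq_getElem?_getD, List.getElem?_set_ne (fun h => hme h.symm), ← List.getD_eq_getElem?_getD]
        exact hunset m hm2 hmN (fun h => hC (Or.inl h)))
    refine ⟨hgo.1, ?_, ?_, hqssort, ?_, ?_⟩
    · intro q hq
      obtain ⟨qn, h1, h2, h3⟩ := hqselems q hq; exact ⟨qn, h1, h2, by omega⟩
    · intro qn hqp hqlt
      by_cases h : qn = i
      · exact List.mem_append.mpr (Or.inr (by rw [h]; exact List.mem_singleton_self _))
      · exact List.mem_append.mpr (Or.inl (hcompl qn hqp (by omega)))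
    · intro m hm2 hmN hsec
      exact ((hgo.2 m hm2 hmN).1) (by omega)
    · intro m hm2 hmN hsec
      exact ((hgo.2 m hm2 hmN).2) (by omega)
  · -- composite i: entry is minFac i ≠ 0, no branch
    have hseci : sec i < i := (comp_facts i hi hp).2.1
    have hv : st.1.toList.getD i 0 = (i.minFac : Int) := hset i hi hiNN hseci
    rw [hv]
    have hne : ((i.minFac : Int) == 0) = false := by
      have := minFac_two_le i hi
      simp only [beq_eq_false_iff_ne, ne_eq]
      exact_mod_cast (by omega : (i.minFac : Int) ≠ 0)
    rw [hne]
    simp only [Bool.false_eq_true, if_false]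
    have hminflt : i.minFac < i := minFac_lt_of_comp i hi hp
    have hthird : ∀ m : Nat, 2 ≤ m → m < (Nx + 1).toNat → ¬ m.Prime → sec m = i →
        (m.minFac : Int) ∈ st.2 := by
      intro m hm2 hmN hmp hsec
      obtain ⟨hprod, hmle⟩ := pending_facts i m hm2 hmp hsec
      have hmfp : m.minFac.Prime := Nat.minFac_prime (by omega)
      exact hcompl _ hmfp (by omega)
    have hgo := inner_go Nx i hi hiN st.2 st.1 hlen
      (fun q hq => by obtain ⟨qn, h1, h2, h3⟩ := helems q hq; exact ⟨qn, h1, h2, by omega⟩)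
      hsort
      (by
        intro m hm2 hmN hC
        apply hset m hm2 hmN
        rcases hC with h | ⟨_, h⟩ | ⟨hmp, h, hnin⟩
        · exact h
        · exact absurd h hp
        · exact absurd (hthird m hm2 hmN hmp h) hnin)
      (fun m hm2 hmN hC => hunset m hm2 hmN (fun h => hC (Or.inl h)))
    refine ⟨hgo.1, ?_, ?_, hsort, ?_, ?_⟩
    · intro q hq
      obtain ⟨qn, h1, h2, h3⟩ := helems q hq; exact ⟨qn, h1, h2, by omega⟩
    · intro qn hqp hqlt
      apply hcompl qn hqp
      rcases Nat.lt_succ_iff_lt_or_eq.mp hqlt with h | h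
      · exact h
      · exact absurd (h ▸ hqp) hp
    · intro m hm2 hmN hsec
      exact ((hgo.2 m hm2 hmN).1) (by omega)
    · intro m hm2 hmN hsec
      exact ((hgo.2 m hm2 hmN).2) (by omega)

lemma sieve_fold_inv (Nx : Int) : ∀ k : Nat, (2 + (k : Int)) ≤ Nx + 1 →
    SInv Nx (2 + k) ((PySem.List.pyRange 2 (2 + (k : Int)) 1).foldl (sieveStep Nx)
      (Array.replicate (Nx + 1).toNat 0, [])) := by
  intro k
  induction k with
  | zero =>
    intro _
    rw [show (2 + ((0 : Nat) : Int)) = (2 : Int) by norm_num,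
        PySem.List.pyRange_one_eq_nil (le_refl 2), List.foldl_nil]
    refine ⟨by simp, by simp, by intro qn hq h; have := hq.two_le; omega, List.Pairwise.nil, ?_, ?_⟩
    · intro m hm2 _ hsec
      have := sec_ge_two m hm2; omega
    · intro m _ hmN _
      rw [Array.toList_replicate, List.getD_eq_getElem?_getD,
          List.getElem?_replicate_of_lt (by simpa using hmN), Option.getD_some]
  | succ k ih =>
    intro hk
    have hk' : (2 + (k : Int)) ≤ Nx + 1 := by push_cast at hk ⊢; omega
    rw [show (2 + ((k + 1 : Nat) : Int)) = (2 + (k : Int)) + 1 by push_cast; ring,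
        PySem.List.pyRange_one_succ_right (by omega), List.foldl_append, List.foldl_cons, List.foldl_nil]
    have hstep := sieveStep_inv Nx (2 + k) _ (by omega) (by push_cast at hk ⊢; omega) (ih hk')
    rw [show ((2 + k : Nat) : Int) = 2 + (k : Int) by push_cast; ring] at hstep
    rw [show 2 + k + 1 = 2 + (k + 1) by ring] at hstep
    exact hstep

lemma sieve_correct (Nx : Int) (m : Nat) (hm2 : 2 ≤ m) (hmN : (m : Int) ≤ Nx) :
    pyAGet (sieve Nx) (m : Int) = (m.minFac : Int) := by
  have hNx2 : 2 ≤ Nx := by omega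
  set k := (Nx - 1).toNat with hk
  have hcast : 2 + (k : Int) = Nx + 1 := by omega
  have hinv := sieve_fold_inv Nx k (by omega)
  rw [hcast] at hinv
  rw [pyAGet_toList, sieve]
  apply hinv.2.2.2.2.1 m hm2 (by omega)
  have hsec := sec_le_self m hm2
  omega

-- ---- per-item loops compute the same prime-factor application ----

lemma facA_item (lpf : Array Int) (X : Int)
    (H : ∀ m : Nat, 2 ≤ m → (m : Int) ≤ X → pyAGet lpf (m : Int) = (m.minFac : Int))
    (a : Int) (hX : 2 ≤ a → a ≤ X) (c : Int) (fac : PySem.Dict Int Int) :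
    facLoopA lpf (a.toNat + 1) a c fac = applyFacs (spfList a.toNat) c fac := by
  by_cases h2 : 2 ≤ a
  · have hcast : ((a.toNat : Nat) : Int) = a := Int.toNat_of_nonneg (by omega)
    rw [← hcast]
    exact facLoopA_eq lpf X H a.toNat (fun _ => by rw [hcast]; exact hX h2) (a.toNat + 1) (by omega) c fac
  · rw [spfList_of_lt a.toNat (by omega), applyFacs_nil, facLoopA,
        if_neg (by omega : ¬ a > 1)]

lemma trial_item (a c : Int) (fac : PySem.Dict Int Int) :
    trialLoop (a.toNat + 2) a 2 c fac = applyFacs (spfList a.toNat) c fac := by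
  by_cases h2 : 2 ≤ a
  · have hcast : ((a.toNat : Nat) : Int) = a := Int.toNat_of_nonneg (by omega)
    rw [← hcast, show (2 : Int) = ((2 : Nat) : Int) from rfl]
    exact trialLoop_eq (a.toNat + 2) a.toNat 2 (le_refl 2) (fun q hq hq2 _ => by omega)
      (by omega) c fac
  · rw [spfList_of_lt a.toNat (by omega), applyFacs_nil, trialLoop,
        if_neg (by omega : ¬ (2 : Int) * 2 ≤ a), if_neg (by omega : ¬ a > 1)]

-- ---- the gcd accumulator is positive when some element is nonzero ----

lemma gcd_fold_zero (A : List Int) : ∀ s : Int,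
    A.foldl (fun g a => pyGcd g a) s = 0 → ∀ x ∈ A, x = 0 := by
  induction A with
  | nil => intro s _ x hx; exact absurd hx List.not_mem_nil
  | cons a l ih =>
    intro s h x hx
    rw [List.foldl_cons] at h
    have hAll := ih (pyGcd s a) h
    have hstart : pyGcd s a ≠ 0 → False := by
      intro hne
      -- every later pyGcd result divides-preserves nonzero: show foldl keeps positivity
      have : ∀ (l : List Int) (t : Int), 1 ≤ t → 1 ≤ l.foldl (fun g a => pyGcd g a) t := by
        intro l
        induction l with
        | nil => intro t ht; simpa using ht
        | cons b m ihm =>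
          intro t ht
          rw [List.foldl_cons]
          apply ihm
          have : Int.gcd t b ≠ 0 := fun h0 => by
            have := Int.gcd_eq_zero_iff.mp h0; omega
          unfold pyGcd; omega
      have h1 : 1 ≤ pyGcd s a := by
        have : (0 : Int) ≤ pyGcd s a := by unfold pyGcd; positivity
        omega
      have := this l _ h1
      omega
    rcases List.mem_cons.mp hx with he | hl
    · subst he
      by_contra hxne
      apply hstart
      unfold pyGcd
      intro h0
      have := Int.gcd_eq_zero_iff.mp (by exact_mod_cast h0)
      exact hxne this.2
    · exact hAll x hl

lemma gcd_fold_pos (A : List Int) (x : Int) (hx : x ∈ A) (hxne : x ≠ 0) :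
    1 ≤ A.foldl (fun g a => pyGcd g a) 0 := by
  have hnz : A.foldl (fun g a => pyGcd g a) 0 ≠ 0 := fun h0 => hxne (gcd_fold_zero A 0 h0 x hx)
  have hnn : 0 ≤ A.foldl (fun g a => pyGcd g a) 0 := by
    have : ∀ (l : List Int) (t : Int), 0 ≤ t → 0 ≤ l.foldl (fun g a => pyGcd g a) t := by
      intro l
      induction l with
      | nil => intro t ht; simpa using ht
      | cons b m ihm =>
        intro t ht
        rw [List.foldl_cons]
        exact ihm _ (by unfold pyGcd; positivity)
    exact this A 0 le_rfl
  omega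

-- ---- every key of cnt that is ≥ 2 is bounded by max(A) ----

lemma reduced_le_max (g x mx : Int) (hg : 1 ≤ g) (hmx : x ≤ mx)
    (h2 : 2 ≤ PySem.Int.floordiv x g) : PySem.Int.floordiv x g ≤ mx := by
  have hx2 : 2 * g ≤ x := (PySem.Int.le_floordiv_iff_mul_le (by omega)).1 h2
  have hxpos : 2 ≤ x := by nlinarith
  have : PySem.Int.floordiv x g < x + 1 := by
    rw [PySem.Int.floordiv_lt_iff_lt_mul (by omega)]
    nlinarith
  omega

-- ---- main equality ----

lemma main_eq (N : Int) (A : List Int) (hne : A ≠ []) (x0 : Int) (hx0 : x0 ∈ A)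
    (hx0ne : x0 ≠ 0) : solve N A = solve_alt N A := by
  rw [solve, solve_alt]
  set g := A.foldl (fun g a => pyGcd g a) 0 with hg
  have hg1 : 1 ≤ g := gcd_fold_pos A x0 hx0 hx0ne
  set key := fun a : Int => PySem.Int.floordiv a g with hkey
  set cnt := A.foldl (fun (cnt : PySem.Dict Int Int) a =>
      cnt.insert (PySem.Int.floordiv a g) (cnt.getD (PySem.Int.floordiv a g) 0 + 1)) PySem.Dict.empty with hcnt
  obtain ⟨mxv, hmx⟩ : ∃ v, PySem.List.max? A (fun x => x) = some v := by
    cases hm : PySem.List.max? A (fun x => x) with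
    | none => exact absurd ((PySem.List.max?_eq_none_iff A _).mp hm) hne
    | some v => exact ⟨v, rfl⟩
  rw [hmx]
  simp only [Option.getD_some]
  have hmax : ∀ y ∈ A, y ≤ mxv := PySem.List.max?_isMax hmx
  have H : ∀ m : Nat, 2 ≤ m → (m : Int) ≤ mxv →
      pyAGet (sieve mxv) (m : Int) = (m.minFac : Int) :=
    fun m hm2 hmN => sieve_correct mxv m hm2 hmN
  -- every item key of cnt is a reduced element of A
  have hkeys : ∀ p ∈ cnt.items, 2 ≤ p.1 → p.1 ≤ mxv := by
    intro p hp h2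
    have hpk : p.1 ∈ cnt.keys := List.mem_map_of_mem hp
    rw [hcnt, PySem.Dict.keys_foldl_insert_key (key := key)
          (f := fun d a => d.getD (key a) 0 + 1)] at hpk
    rw [PySem.Dict.keys_empty, PySem.Set.update_nil_left] at hpk
    obtain ⟨x, hxA, hxk⟩ := List.mem_map.mp ((PySem.Set.mem_ofList _ _).mp hpk)
    rw [← hxk] at h2 ⊢
    exact reduced_le_max g x mxv hg1 (hmax x hxA) h2
  have hfac : cnt.items.foldl
        (fun fac ac => facLoopA (sieve mxv) (ac.1.toNat + 1) ac.1 ac.2 fac) PySem.Dict.empty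
      = cnt.items.foldl
        (fun fac ac => trialLoop (ac.1.toNat + 2) ac.1 2 ac.2 fac) PySem.Dict.empty := by
    apply PySem.List.foldl_congr_mem
    intro fac ac hac
    rw [facA_item (sieve mxv) mxv H ac.1 (hkeys ac hac) ac.2 fac, trial_item]
  rw [hfac]

-- ===== VERDICT (by name: the statement is the Claim_ definition above) =====
theorem solve_spec : Claim_equal_solve := by
  intro N A _ hpre
  obtain ⟨hne, x0, hx0, hx0ne⟩ := hpre
  exact (main_eq N A hne x0 hx0 hx0ne).symm ▸ rfl
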